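-- pv_equiv track=rewrite | github.com/miliar/Code_Jam_Webscraper | solutions_python/solutions_year17_round1_nr1/286.py | solve
-- ===== SOURCE A (Python) =====
-- def solve(grid):
--     grid = list(map(list, grid))
--     R = len(grid); C = len(grid[0])
--
--     # Row pass
--     for i in range(R):
--         current = '?'
--         for j in range(C):
--             if grid[i][j] == '?':
--                 grid[i][j] = current
--             else:
--                 current = grid[i][j]
--
--         current = '?'
--         for j in range(C-1, -1, -1):
--             if grid[i][j] == '?':
--                 grid[i][j] = current
--             else:
--                 current = grid[i][j]
--
--     # Safety check
--     for line in grid: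
--         if '?' in line:
--             assert(all(s == '?' for s in line))
--
--     # Column pass
--     for j in range(C):
--         current = '?'
--         for i in range(R):
--             if grid[i][j] == '?':
--                 grid[i][j] = current
--             else:
--                 current = grid[i][j]
--
--         current = '?'
--         for i in range(R-1, -1, -1):
--             if grid[i][j] == '?':
--                 grid[i][j] = current
--             else:
--                 current = grid[i][j]
--
--     # Translate to string
--     return list(map(lambda x: ''.join(x), grid))
-- ===== SOURCE B (Python) =====
-- def fill_line(line):
--     """Fill each '?' with the nearest known character to its left,
--     falling back to the nearest one to its right."""
--     out = []
--     for k, c in enumerate(line):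
--         if c != '?':
--             out.append(c)
--             continue
--         prev = next((x for x in reversed(line[:k]) if x != '?'), None)
--         if prev is not None:
--             out.append(prev)
--         else:
--             out.append(next((x for x in line[k + 1:] if x != '?'), c))
--     return out
--
--
-- def solve(grid):
--     rows = [fill_line(list(r)) for r in grid]
--     for j in range(len(rows[0])):
--         column = fill_line([row[j] for row in rows])
--         for row, c in zip(rows, column):
--             row[j] = c
--     return [''.join(row) for row in rows]
-- ===== Notes on version B (the rewrite author's own statement) =====
-- stated objective: alternative
-- what changed: Replaces A's four stateful in-place directional sweeps (a forward and a backward pass over each row, then over each column, each carrying a running `current` character) by a pure helper fill_line that maps every cell to the nearest known character (preceding, else following) in its line, applied once to each row and then to each extracted column, the filled column being written back into the row lists.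
import Mathlib
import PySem

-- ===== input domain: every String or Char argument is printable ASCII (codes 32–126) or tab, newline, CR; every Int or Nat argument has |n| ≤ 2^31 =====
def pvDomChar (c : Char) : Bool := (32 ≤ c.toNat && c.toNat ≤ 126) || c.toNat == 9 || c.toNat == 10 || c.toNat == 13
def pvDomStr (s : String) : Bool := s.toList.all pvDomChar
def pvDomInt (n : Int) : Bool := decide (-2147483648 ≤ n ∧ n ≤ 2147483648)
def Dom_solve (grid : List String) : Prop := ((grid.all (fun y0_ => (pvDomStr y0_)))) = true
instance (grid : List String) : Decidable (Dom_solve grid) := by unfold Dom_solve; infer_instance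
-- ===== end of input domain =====

-- B replaces A's four stateful in-place directional sweeps by a pure nearest-neighbour
-- fill_line helper applied to each row and then to each extracted column, the filled
-- column written back into the rows (objective: alternative decomposition).

-- ===== PORT A =====
-- forward sweep of one line with running `current` (A's `for j in range(C)` loop acts on
-- the first C cells only, so the ports run the sweeps on `r.take C` and keep `r.drop C`)
def fwdA (cur : Char) : List Char → List Char
  | [] => []
  | c :: rest => if c = '?' then cur :: fwdA cur rest else c :: fwdA c rest

-- backward sweep (A's `for j in range(C-1,-1,-1)` loop), returning the line and `current`
def bwdA : List Char → List Char × Char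
  | [] => ([], '?')
  | c :: rest =>
    let p := bwdA rest
    if c = '?' then (p.2 :: p.1, p.2) else (c :: p.1, c)

-- column forward sweep at column j (A's `for i in range(R)` loop writing grid[i][j])
def colFwdA (j : Nat) (cur : Char) : List (List Char) → List (List Char)
  | [] => []
  | row :: rest =>
    let c := row.getD j '?'
    if c = '?' then row.set j cur :: colFwdA j cur rest
    else row :: colFwdA j c rest

-- column backward sweep at column j (A's descending `i` loop)
def colBwdA (j : Nat) : List (List Char) → List (List Char) × Char
  | [] => ([], '?')
  | row :: rest =>
    let p := colBwdA j rest
    let c := row.getD j '?'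
    if c = '?' then (row.set j p.2 :: p.1, p.2) else (row :: p.1, c)

-- A's safety `assert` is skipped: after the row pass a line containing '?' is all '?',
-- so the assert never fires on any input reaching it inside Pre_solve.
def solve (grid : List String) : List String :=
  let g := grid.map String.toList
  let C := (g.headD []).length
  let g1 := g.map (fun r => (bwdA (fwdA '?' (r.take C))).1 ++ r.drop C)
  let g2 := (List.range C).foldl (fun h j => (colBwdA j (colFwdA j '?' h)).1) g1
  g2.map String.ofList

-- ===== PORT B =====
-- fill_line from Source B: each '?' gets the nearest non-'?' to its left, falling back to
-- the nearest one to its right (the two `next(...)` scans are ported as find? over the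
-- reversed prefix / the suffix — the same traversal order as the Python generators)
def fillB (line : List Char) : List Char :=
  (List.range line.length).map (fun k =>
    let c := line.getD k '?'
    if c ≠ '?' then c
    else
      match ((line.take k).reverse).find? (fun x => x ≠ '?') with
      | some p => p
      | none => ((line.drop (k + 1)).find? (fun x => x ≠ '?')).getD c)

-- Source B's column loop: fill each column and write it back into the row lists
-- (`row[j]` is ported as getD — exact inside Pre_solve, where j < every row's length;
-- where Python B raises IndexError instead, Pre_solve excludes the input)
def solve_alt (grid : List String) : List String :=
  let rows := grid.map (fun r => fillB r.toList)
  let rows2 := (List.range (rows.headD []).length).foldl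
    (fun rs j =>
      let column := fillB (rs.map (fun row => row.getD j '?'))
      List.zipWith (fun row c => row.set j c) rs column) rows
  rows2.map String.ofList

-- ===== PRECONDITION & SPEC =====
-- Pre_ excludes exactly the inputs on which A raises: the empty grid (IndexError on
-- grid[0]), a row shorter than row 0 (IndexError in the row pass), and a row that after
-- the row pass still mixes '?' with other characters — i.e. whose first C cells are all
-- '?' or whose tail beyond C keeps a '?' — without being entirely '?' (AssertionError).
def pvRowOk (C : Nat) (l : List Char) : Bool :=
  decide (C ≤ l.length) &&
    (l.all (fun x => x == '?') ||
      ((l.drop C).all (fun x => x != '?') && (l.take C).any (fun x => x != '?')) ||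
      !(l.contains '?'))

def Pre_solve (grid : List String) : Prop :=
  grid ≠ [] ∧ ∀ s ∈ grid, pvRowOk (grid.headD "").toList.length s.toList = true
instance (grid : List String) : Decidable (Pre_solve grid) := by unfold Pre_solve; infer_instance

def pvWitness_solve : List String := ["?a", "??"]

def Spec_solve (grid : List String) (out : List String) : Prop := out = solve_alt grid
instance (grid : List String) (out : List String) : Decidable (Spec_solve grid out) := by unfold Spec_solve; infer_instance

-- ===== CLAIM (what is proved, stated in full; the proofs are below) =====
def Claim_equal_solve : Prop := ∀ (grid : List String), Dom_solve grid → Pre_solve grid → Spec_solve grid (solve grid)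


-- ===== LEMMAS AND PROOFS =====

-- common specification of one filled sequence: each element failing `good` takes the
-- nearest good element to its left, else the nearest good one to its right, else stays
def specFill {α : Type} (good : α → Bool) : Option α → List α → List α
  | _, [] => []
  | prev, a :: rest =>
    if good a then a :: specFill good (some a) rest
    else (match prev with | some x => x | none => ((rest.find? good).getD a)) ::
      specFill good prev rest

-- the character-level instance

def cgood (c : Char) : Bool := c ≠ '?'

theorem specFill_some (c : Char) (l : List Char) : specFill cgood (some c) l = fwdA c l := by
  induction l generalizing c with
  | nil => rfl
  | cons a rest ih =>
    simp only [specFill, fwdA, cgood]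
    by_cases h : a = '?' <;> simp [h, ih]

theorem fwdA_noQ (c : Char) (l : List Char) (hc : c ≠ '?') : ∀ x ∈ fwdA c l, x ≠ '?' := by
  induction l generalizing c with
  | nil => simp [fwdA]
  | cons a rest ih =>
    simp only [fwdA]
    split_ifs with h
    · intro x hx; rcases List.mem_cons.1 hx with rfl | hx
      · exact hc
      · exact ih c hc x hx
    · intro x hx; rcases List.mem_cons.1 hx with rfl | hx
      · exact h
      · exact ih a h x hx

theorem bwdA_noQ (l : List Char) (h : ∀ x ∈ l, x ≠ '?') : bwdA l = (l, l.headD '?') := by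
  induction l with
  | nil => rfl
  | cons a rest ih =>
    have ha : a ≠ '?' := h a (List.mem_cons_self ..)
    simp only [bwdA, ih (fun x hx => h x (List.mem_cons_of_mem _ hx))]
    simp [ha]

theorem rowPassA_eq (l : List Char) :
    bwdA (fwdA '?' l) = (specFill cgood none l, ((l.find? cgood).getD '?')) := by
  induction l with
  | nil => rfl
  | cons a rest ih =>
    by_cases ha : a = '?'
    · subst ha
      simp only [fwdA]
      simp [bwdA, ih, specFill, cgood, List.find?]
    · simp only [fwdA, if_neg ha]
      rw [bwdA_noQ (a :: fwdA a rest) (by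
        intro x hx
        rcases List.mem_cons.1 hx with rfl | hx
        · exact ha
        · exact fwdA_noQ a rest ha x hx)]
      simp [specFill, cgood, List.find?, ha, specFill_some]

theorem specFill_length {α : Type} (good : α → Bool) (prev : Option α) (l : List α) :
    (specFill good prev l).length = l.length := by
  induction l generalizing prev with
  | nil => rfl
  | cons a rest ih => simp only [specFill]; split_ifs <;> simp [ih]

theorem specFill_getD {α : Type} (good : α → Bool) (l : List α) (prev : Option α)
    (d : α) (k : Nat) (hk : k < l.length) :
    (specFill good prev l).getD k d =
      (if good (l.getD k d) then l.getD k d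
       else
        match ((l.take k).reverse).find? good with
        | some p => p
        | none =>
          match prev with
          | some p => p
          | none => ((l.drop (k + 1)).find? good).getD (l.getD k d)) := by
  induction l generalizing prev k with
  | nil => simp at hk
  | cons a rest ih =>
    match k with
    | 0 =>
      simp only [specFill, List.take_zero, List.reverse_nil, List.find?_nil, List.drop_succ_cons,
        List.drop_zero, List.getD_cons_zero]
      split_ifs with h <;> simp [h]
    | k + 1 =>
      have hk' : k < rest.length := by simpa using hk
      simp only [List.getD_cons_succ, List.take_succ_cons, List.reverse_cons, List.drop_succ_cons]
      by_cases ha : good a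
      · rw [show specFill good prev (a :: rest) = a :: specFill good (some a) rest by
          simp [specFill, ha]]
        rw [List.getD_cons_succ, ih (some a) k hk']
        rw [List.find?_append]
        cases hfind : List.find? good (rest.take k).reverse <;> simp [hfind, ha]
      · rw [show specFill good prev (a :: rest) =
            (match prev with | some x => x | none => ((rest.find? good).getD a)) ::
              specFill good prev rest by simp [specFill, ha]]
        rw [List.getD_cons_succ, ih prev k hk']
        rw [List.find?_append]
        simp [ha]

theorem fillB_eq (l : List Char) : fillB l = specFill cgood none l := by
  apply List.ext_getElem
  · simp [fillB, specFill_length]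
  · intro k h1 h2
    have hk : k < l.length := by simpa [fillB] using h1
    rw [show (specFill cgood none l)[k] = (specFill cgood none l).getD k '?' from
        (List.getD_eq_getElem (specFill cgood none l) '?' h2).symm,
      specFill_getD cgood l none '?' k hk]
    simp only [fillB, List.getElem_map, List.getElem_range]
    have hcg : cgood = (fun x : Char => !decide (x = '?')) := funext fun x => by simp [cgood]
    by_cases h : l.getD k '?' = '?'
    · simp only [h, ite_not, hcg]
      cases hf : List.find? (fun x => !decide (x = '?')) (List.take k l).reverse with
      | none => simp [hf]
      | some p => simp [hf]
    · simp only [List.getD_eq_getElem?_getD] at h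
      simp [h, cgood]

theorem specFill_noQ {α : Type} (good : α → Bool) (prev : Option α) (l : List α)
    (h : ∀ x ∈ l, good x = true) : specFill good prev l = l := by
  induction l generalizing prev with
  | nil => rfl
  | cons a rest ih =>
    have ha := h a (List.mem_cons_self ..)
    simp only [specFill, if_pos ha]
    exact congrArg _ (ih _ (fun x hx => h x (List.mem_cons_of_mem _ hx)))

theorem specFill_allQ {α : Type} (good : α → Bool) (l : List α)
    (h : ∀ x ∈ l, good x = false) : specFill good none l = l := by
  induction l with
  | nil => rfl
  | cons a rest ih =>
    have ha := h a (List.mem_cons_self ..)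
    have hrest : ∀ x ∈ rest, good x = false := fun x hx => h x (List.mem_cons_of_mem _ hx)
    simp only [specFill, ha, Bool.false_eq_true, if_false, ih hrest]
    rw [List.find?_eq_none.2 (by intro x hx; simp [hrest x hx])]
    simp

theorem specFill_append_some {α : Type} (good : α → Bool) (T : List α)
    (hT : ∀ x ∈ T, good x = true) (p : α) (P : List α) :
    specFill good (some p) (P ++ T) = specFill good (some p) P ++ T := by
  induction P generalizing p with
  | nil => simpa using specFill_noQ good (some p) T hT
  | cons d P' ih =>
    simp only [List.cons_append, specFill]
    split_ifs <;> simp [ih]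

theorem specFill_append_none {α : Type} (good : α → Bool) (T : List α)
    (hT : ∀ x ∈ T, good x = true) (P : List α) (hP : ∃ x ∈ P, good x = true) :
    specFill good none (P ++ T) = specFill good none P ++ T := by
  induction P with
  | nil => simp at hP
  | cons c P' ih =>
    by_cases hc : good c
    · simp only [List.cons_append, specFill, if_pos hc, specFill_append_some good T hT]
    · have hP' : ∃ x ∈ P', good x = true := by
        rcases hP with ⟨x, hx, hxq⟩
        rcases List.mem_cons.1 hx with rfl | hx
        · exact absurd hxq hc
        · exact ⟨x, hx, hxq⟩
      simp only [List.cons_append, specFill, if_neg hc, ih hP', List.find?_append]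
      cases hz : List.find? good P' with
      | none =>
        exfalso
        obtain ⟨y, hy, hyq⟩ := hP'
        have := List.find?_eq_none.1 hz y hy
        simp [hyq] at this
      | some z => simp [hz]

theorem rowOk_iff (C : Nat) (l : List Char) : pvRowOk C l = true ↔
    C ≤ l.length ∧ ((∀ x ∈ l, x = '?') ∨
      ((∀ x ∈ l.drop C, x ≠ '?') ∧ (∃ x ∈ l.take C, x ≠ '?')) ∨ '?' ∉ l) := by
  simp [pvRowOk]
  intro _
  rw [or_assoc]

-- on every row Pre_solve admits, the full-row fill equals A's prefix fill with the tail kept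

theorem row_eq (C : Nat) (l : List Char)
    (hcond : (∀ x ∈ l, x = '?') ∨
      ((∀ x ∈ l.drop C, x ≠ '?') ∧ (∃ x ∈ l.take C, x ≠ '?')) ∨ '?' ∉ l) :
    specFill cgood none l = specFill cgood none (l.take C) ++ l.drop C := by
  rcases hcond with hall | ⟨hT, hP⟩ | hno
  · rw [specFill_allQ cgood l (by intro x hx; simp [cgood, hall x hx]),
      specFill_allQ cgood (l.take C)
        (by intro x hx; simp [cgood, hall x (List.mem_of_mem_take hx)]),
      List.take_append_drop]
  · conv_lhs => rw [← List.take_append_drop C l]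
    refine specFill_append_none cgood _ (by intro x hx; simp [cgood, hT x hx]) _ ?_
    obtain ⟨x, hx, hxq⟩ := hP
    exact ⟨x, hx, by simp [cgood, hxq]⟩
  · have hnq : ∀ x ∈ l, x ≠ '?' := fun x hx h => hno (h ▸ hx)
    rw [specFill_noQ cgood none l (by intro x hx; simp [cgood, hnq x hx]),
      specFill_noQ cgood none (l.take C)
        (by intro x hx; simp [cgood, hnq x (List.mem_of_mem_take hx)]),
      List.take_append_drop]

-- grid-level machinery: reading and writing one column

def colGet (j : Nat) (g : List (List Char)) : List Char := g.map (fun r => r.getD j '?')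

def setCol (j : Nat) (g : List (List Char)) (v : List Char) : List (List Char) :=
  List.zipWith (fun r c => r.set j c) g v

theorem set_getD_self (row : List Char) (j : Nat) (h : j < row.length) :
    row.set j (row.getD j '?') = row := by
  rw [List.getD_eq_getElem row '?' h, List.set_getElem_self]

theorem colFwdA_eq (j : Nat) (cur : Char) (g : List (List Char)) (h : ∀ r ∈ g, j < r.length) :
    colFwdA j cur g = setCol j g (fwdA cur (colGet j g)) := by
  induction g generalizing cur with
  | nil => rfl
  | cons row rest ih =>
    have hr := h row (List.mem_cons_self ..)
    have h' : ∀ r ∈ rest, j < r.length := fun r hr' => h r (List.mem_cons_of_mem _ hr')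
    simp only [colFwdA, colGet, List.map_cons, fwdA, setCol]
    by_cases hc : row.getD j '?' = '?'
    · rw [if_pos hc, if_pos hc, List.zipWith_cons_cons]
      exact congrArg _ (ih cur h')
    · simp only [if_neg hc, List.zipWith_cons_cons, set_getD_self row j hr]
      exact congrArg _ (ih _ h')

theorem colBwdA_eq (j : Nat) (g : List (List Char)) (h : ∀ r ∈ g, j < r.length) :
    colBwdA j g = (setCol j g (bwdA (colGet j g)).1, (bwdA (colGet j g)).2) := by
  induction g with
  | nil => rfl
  | cons row rest ih =>
    have hr := h row (List.mem_cons_self ..)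
    have h' : ∀ r ∈ rest, j < r.length := fun r hr' => h r (List.mem_cons_of_mem _ hr')
    simp only [colBwdA, ih h', colGet, List.map_cons, bwdA, setCol]
    by_cases hc : row.getD j '?' = '?'
    · have hc' := hc
      rw [List.getD_eq_getElem?_getD] at hc'
      simp [hc']
    · have hc' := hc
      rw [List.getD_eq_getElem?_getD] at hc'
      have hs := set_getD_self row j hr
      rw [List.getD_eq_getElem?_getD] at hs
      simp [hc', hs]

theorem le_setCol (j C : Nat) (g : List (List Char)) (v : List Char)
    (h : ∀ r ∈ g, C ≤ r.length) : ∀ r ∈ setCol j g v, C ≤ r.length := by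
  induction g generalizing v with
  | nil => simp [setCol]
  | cons row rest ih =>
    cases v with
    | nil => simp [setCol]
    | cons c v' =>
      intro r hr
      simp only [setCol, List.zipWith_cons_cons, List.mem_cons] at hr
      rcases hr with rfl | hr
      · simpa using h row (List.mem_cons_self ..)
      · exact ih v' (fun r' hr' => h r' (List.mem_cons_of_mem _ hr')) r hr

theorem colGet_setCol (j : Nat) (g : List (List Char)) (v : List Char)
    (h : ∀ r ∈ g, j < r.length) (hl : v.length = g.length) :
    colGet j (setCol j g v) = v := by
  induction g generalizing v with
  | nil => simp at hl; simp [setCol, colGet, hl]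
  | cons row rest ih =>
    cases v with
    | nil => simp at hl
    | cons c v' =>
      have hr := h row (List.mem_cons_self ..)
      simp only [setCol, List.zipWith_cons_cons, colGet, List.map_cons]
      rw [List.getD_eq_getElem _ '?' (by simpa using hr), List.getElem_set_self]
      exact congrArg _ (ih v' (fun r hr' => h r (List.mem_cons_of_mem _ hr')) (by simpa using hl))

theorem setCol_setCol (j : Nat) (g : List (List Char)) (v w : List Char)
    (hl : v.length = g.length) :
    setCol j (setCol j g v) w = setCol j g w := by
  induction g generalizing v w with
  | nil => simp [setCol]
  | cons row rest ih =>
    cases v with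
    | nil => simp at hl
    | cons c v' =>
      cases w with
      | nil => simp [setCol]
      | cons d w' =>
        simp only [setCol, List.zipWith_cons_cons, List.set_set]
        exact congrArg _ (ih v' w' (by simpa using hl))

theorem lt_setCol (j : Nat) (g : List (List Char)) (v : List Char)
    (h : ∀ r ∈ g, j < r.length) : ∀ r ∈ setCol j g v, j < r.length := by
  induction g generalizing v with
  | nil => simp [setCol]
  | cons row rest ih =>
    cases v with
    | nil => simp [setCol]
    | cons c v' =>
      intro r hr
      simp only [setCol, List.zipWith_cons_cons, List.mem_cons] at hr
      rcases hr with rfl | hr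
      · simp [h row (List.mem_cons_self ..)]
      · exact ih v' (fun r' hr' => h r' (List.mem_cons_of_mem _ hr')) r hr

theorem colGet_length (j : Nat) (g : List (List Char)) : (colGet j g).length = g.length := by
  simp [colGet]

theorem fwdA_length (c : Char) (l : List Char) : (fwdA c l).length = l.length := by
  induction l generalizing c with
  | nil => rfl
  | cons a rest ih => simp only [fwdA]; split_ifs <;> simp [ih]

-- one round of A's column pass fills column j according to specFill

theorem step_eq (j : Nat) (g : List (List Char)) (h : ∀ r ∈ g, j < r.length) :
    (colBwdA j (colFwdA j '?' g)).1 = setCol j g (specFill cgood none (colGet j g)) := by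
  rw [colFwdA_eq j '?' g h]
  have hf1 : (fwdA '?' (colGet j g)).length = g.length := by
    rw [fwdA_length, colGet_length]
  rw [colBwdA_eq j _ (lt_setCol j g _ h)]
  simp only
  rw [colGet_setCol j g _ h hf1, setCol_setCol j g _ _ hf1, rowPassA_eq]

-- A's whole column pass, described column by column: it keeps every row's length and its
-- tail beyond column C, and fills each visited column according to specFill

-- A's column pass and B's column loop perform the same per-column update
theorem folds_eq (C : Nat) (js : List Nat) (g : List (List Char))
    (hle : ∀ r ∈ g, C ≤ r.length) (hjs : ∀ j ∈ js, j < C) :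
    js.foldl (fun h j => (colBwdA j (colFwdA j '?' h)).1) g =
    js.foldl (fun rs j =>
      List.zipWith (fun row c => row.set j c) rs
        (fillB (rs.map (fun row => row.getD j '?')))) g := by
  induction js generalizing g with
  | nil => rfl
  | cons j rest ih =>
    have hj : j < C := hjs j (List.mem_cons_self ..)
    have hlt : ∀ r ∈ g, j < r.length := fun r hr => Nat.lt_of_lt_of_le hj (hle r hr)
    simp only [List.foldl_cons]
    rw [step_eq j g hlt,
      show List.zipWith (fun row c => row.set j c) g
          (fillB (g.map (fun row => row.getD j '?'))) =
        setCol j g (specFill cgood none (colGet j g)) by rw [fillB_eq]; rfl]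
    exact ih _ (le_setCol j C g _ hle) (fun j' hj' => hjs j' (List.mem_cons_of_mem _ hj'))

-- ===== VERDICT (by name: the statement is the Claim_ definition above) =====
theorem solve_spec : Claim_equal_solve := by
  intro grid _ hpre
  obtain ⟨hne, hrowspre⟩ := hpre
  obtain ⟨s0, grid', rfl⟩ : ∃ s0 grid', grid = s0 :: grid' := by
    cases grid with
    | nil => exact absurd rfl hne
    | cons a b => exact ⟨a, b, rfl⟩
  show solve (s0 :: grid') = solve_alt (s0 :: grid')
  simp only [List.headD_cons] at hrowspre
  set C := s0.toList.length with hC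
  have hprops : ∀ s ∈ s0 :: grid', C ≤ s.toList.length ∧
      ((∀ x ∈ s.toList, x = '?') ∨
        ((∀ x ∈ s.toList.drop C, x ≠ '?') ∧ (∃ x ∈ s.toList.take C, x ≠ '?')) ∨
        '?' ∉ s.toList) :=
    fun s hs => (rowOk_iff C s.toList).1 (hrowspre s hs)
  set g1 := (s0 :: grid').map (fun r => specFill cgood none r.toList) with hg1
  have hrow : ∀ s ∈ s0 :: grid',
      specFill cgood none (s.toList.take C) ++ s.toList.drop C = specFill cgood none s.toList := by
    intro s hs
    exact (row_eq C s.toList (hprops s hs).2).symm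
  have hle1 : ∀ r ∈ g1, C ≤ r.length := by
    intro r hr
    rw [hg1] at hr
    obtain ⟨s, hs, rfl⟩ := List.mem_map.1 hr
    rw [specFill_length]
    exact (hprops s hs).1
  -- A's side
  have hA : solve (s0 :: grid') =
      ((List.range C).foldl (fun h j => (colBwdA j (colFwdA j '?' h)).1) g1).map
        String.ofList := by
    simp only [solve, List.map_cons, List.headD_cons, List.map_map, Function.comp_def]
    have hhead : (bwdA (fwdA '?' (List.take s0.toList.length s0.toList))).1 ++
        List.drop s0.toList.length s0.toList = specFill cgood none s0.toList := by
      rw [show (bwdA (fwdA '?' (s0.toList.take s0.toList.length))).1 =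
            specFill cgood none (s0.toList.take s0.toList.length) by rw [rowPassA_eq]]
      exact hrow s0 (List.mem_cons_self ..)
    have htail : List.map (fun x => (bwdA (fwdA '?' (List.take s0.toList.length x.toList))).1 ++
        List.drop s0.toList.length x.toList) grid' =
        List.map (fun r => specFill cgood none r.toList) grid' := by
      apply List.map_congr_left
      intro s hs
      rw [show (bwdA (fwdA '?' (s.toList.take s0.toList.length))).1 =
            specFill cgood none (s.toList.take s0.toList.length) by rw [rowPassA_eq]]
      exact hrow s (List.mem_cons_of_mem _ hs)
    rw [hhead, htail,
      show specFill cgood none s0.toList ::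
          List.map (fun r => specFill cgood none r.toList) grid' = g1 by
        rw [hg1, List.map_cons],
      hC]
  -- B's side
  have hfilled : (s0 :: grid').map (fun r => fillB r.toList) = g1 := by
    rw [hg1]
    apply List.map_congr_left
    intro s _
    exact fillB_eq s.toList
  have hB : solve_alt (s0 :: grid') =
      ((List.range C).foldl (fun rs j =>
        List.zipWith (fun row c => row.set j c) rs
          (fillB (rs.map (fun row => row.getD j '?')))) g1).map String.ofList := by
    simp only [solve_alt]
    rw [hfilled]
    congr 2
    rw [hg1, List.map_cons, List.headD_cons, specFill_length, hC]
  rw [hA, hB]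
  congr 1
  exact folds_eq C (List.range C) g1 hle1 (fun j hj => List.mem_range.1 hj)
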